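-- pv_equiv track=rewrite | github.com/Versike/text_node_search | tree.py | sequential_unification
-- ===== SOURCE A (Python) =====
-- def sequential_unification(data: list) -> list:
--     if len(data) == 0:
--         return None
--     result = data[0]
--     for i in range(len(data) - 1):
--         A = result
--         B = data[i + 1]
--         if len(A) == 0 or len(B) == 0:
--             return None
--         result = []
--         for a in A:
--             for b in B:
--                 if a[:2] == b[:2]:
--                     result.append(a)
--     return result
-- ===== SOURCE B (Python) =====
-- def sequential_unification(data: list) -> list:
--     if not data:
--         return None
--     result = data[0]
--     for nxt in data[1:]:
--         if not result or not nxt: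
--             return None
--         counts = {}
--         for b in nxt:
--             k = b[:2]
--             counts[k] = counts.get(k, 0) + 1
--         result = [a for a in result for _ in range(counts.get(a[:2], 0))]
--     return result
-- ===== Notes on version B (the rewrite author's own statement) =====
-- stated objective: faster
-- what changed: B replaces A's nested scan of the next list for every element of the running result by a dict of prefix-2 counts built once per step, then emits each surviving element with replicate-by-count.
import Mathlib
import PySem

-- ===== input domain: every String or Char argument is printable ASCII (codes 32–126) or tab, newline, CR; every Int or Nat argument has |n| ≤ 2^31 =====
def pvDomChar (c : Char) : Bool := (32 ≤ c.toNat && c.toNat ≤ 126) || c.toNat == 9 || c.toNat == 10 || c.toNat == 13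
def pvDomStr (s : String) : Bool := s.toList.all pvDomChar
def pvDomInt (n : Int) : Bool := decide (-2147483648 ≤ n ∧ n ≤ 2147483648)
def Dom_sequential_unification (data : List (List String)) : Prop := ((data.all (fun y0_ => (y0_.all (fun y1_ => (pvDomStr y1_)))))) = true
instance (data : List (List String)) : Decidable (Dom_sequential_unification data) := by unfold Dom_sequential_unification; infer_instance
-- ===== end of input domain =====

-- B builds a dict of b[:2] counts once per step instead of rescanning the next list for every element; same return value, asymptotically faster step.

-- s[:2]  (both Pythons compute this slice)
def pfx2 (s : String) : String := PySem.Str.slice s none (some 2)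

-- ===== PORT A =====
-- inner double loop: for a in A: for b in B: if a[:2]==b[:2]: result.append(a)
def suA_step (A B : List String) : List String :=
  A.foldl (fun res a => B.foldl (fun res b => if pfx2 a = pfx2 b then res ++ [a] else res) res) []

-- the 'for i in range(len(data)-1)' loop with its early 'return None'
def suA_loop (result : List String) (rest : List (List String)) : Option (List String) :=
  match rest with
  | [] => some result
  | B :: rest' =>
      if result.length = 0 ∨ B.length = 0 then none
      else suA_loop (suA_step result B) rest'

def sequential_unification (data : List (List String)) : Option (List String) :=
  match data with
  | [] => none
  | r :: rest => suA_loop r rest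

-- ===== PORT B =====
-- counts = {} ; for b in nxt: counts[b[:2]] = counts.get(b[:2], 0) + 1
def suB_counts (nxt : List String) : PySem.Dict String Int :=
  nxt.foldl (fun d b => d.insert (pfx2 b) (d.getD (pfx2 b) 0 + 1)) PySem.Dict.empty

-- result = [a for a in result for _ in range(counts.get(a[:2], 0))]
def suB_step (result nxt : List String) : List String :=
  let counts := suB_counts nxt
  result.flatMap (fun a => List.replicate (counts.getD (pfx2 a) 0).toNat a)

-- for nxt in data[1:] with early 'return None'
def suB_loop (result : List String) (rest : List (List String)) : Option (List String) :=
  match rest with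
  | [] => some result
  | nxt :: rest' =>
      if result = [] ∨ nxt = [] then none
      else suB_loop (suB_step result nxt) rest'

def sequential_unification_alt (data : List (List String)) : Option (List String) :=
  match data with
  | [] => none
  | r :: rest => suB_loop r rest

-- ===== PRECONDITION & SPEC =====
def Spec_sequential_unification (data : List (List String)) (out : Option (List String)) : Prop := out = sequential_unification_alt data
instance (data : List (List String)) (out : Option (List String)) : Decidable (Spec_sequential_unification data out) := by unfold Spec_sequential_unification; infer_instance

-- ===== CLAIM (what is proved, stated in full; the proofs are below) =====
def Claim_equal_sequential_unification : Prop := ∀ (data : List (List String)), Dom_sequential_unification data → Spec_sequential_unification data (sequential_unification data)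

-- ===== LEMMAS AND PROOFS =====

-- A's inner loop over B appends one copy of a per matching b
theorem suA_inner_eq (a : String) (B : List String) (res : List String) :
    B.foldl (fun res b => if pfx2 a = pfx2 b then res ++ [a] else res) res
      = res ++ List.replicate ((B.map pfx2).count (pfx2 a)) a := by
  induction B generalizing res with
  | nil => simp
  | cons b B ih =>
      simp only [List.foldl_cons, List.map_cons, List.count_cons, ih]
      by_cases h : pfx2 a = pfx2 b
      · simp [h, ← List.replicate_succ]
      · have hb : (pfx2 b == pfx2 a) = false := by
          simp; exact fun e => h e.symm
        simp [h, hb]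

-- folding "append g a" from the left is flatMap
theorem foldl_app_flatMap (g : String → List String) (A acc : List String) :
    A.foldl (fun acc a => acc ++ g a) acc = acc ++ A.flatMap g := by
  induction A generalizing acc with
  | nil => simp
  | cons a A ih => simp [ih]

-- B's counter loop counts the prefixes
theorem suB_counts_getD_gen (nxt : List String) (d : PySem.Dict String Int) (k : String) :
    (nxt.foldl (fun d b => d.insert (pfx2 b) (d.getD (pfx2 b) 0 + 1)) d).getD k 0
      = d.getD k 0 + ((nxt.map pfx2).count k : Int) := by
  induction nxt generalizing d with
  | nil => simp
  | cons b nxt ih =>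
      simp only [List.foldl_cons, List.map_cons, List.count_cons, ih,
        PySem.Dict.getD_insert]
      by_cases h : k = pfx2 b
      · simp [h]; ring
      · have hb : (pfx2 b == k) = false := by simp; exact fun e => h e.symm
        simp [h, hb]

theorem suB_counts_getD (nxt : List String) (k : String) :
    (suB_counts nxt).getD k 0 = ((nxt.map pfx2).count k : Int) := by
  unfold suB_counts
  simpa using suB_counts_getD_gen nxt PySem.Dict.empty k

theorem step_eq (A B : List String) : suA_step A B = suB_step A B := by
  unfold suA_step
  have hf : (fun (res : List String) a =>
        B.foldl (fun res b => if pfx2 a = pfx2 b then res ++ [a] else res) res)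
      = fun res a => res ++ List.replicate ((B.map pfx2).count (pfx2 a)) a :=
    funext fun res => funext fun a => suA_inner_eq a B res
  rw [hf, foldl_app_flatMap]
  show _ = A.flatMap (fun a => List.replicate (((suB_counts B).getD (pfx2 a) 0)).toNat a)
  simp only [List.nil_append]
  exact List.flatMap_congr (fun a _ => by rw [suB_counts_getD]; simp)

theorem loop_eq (result : List String) (rest : List (List String)) :
    suA_loop result rest = suB_loop result rest := by
  induction rest generalizing result with
  | nil => rfl
  | cons B rest ih =>
      simp only [suA_loop, suB_loop, List.length_eq_zero_iff, step_eq, ih]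

-- ===== VERDICT (by name: the statement is the Claim_ definition above) =====
theorem sequential_unification_spec : Claim_equal_sequential_unification := by
  intro data _
  unfold Spec_sequential_unification sequential_unification sequential_unification_alt
  cases data with
  | nil => rfl
  | cons r rest => exact loop_eq r rest
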